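-- pv_equiv track=rewrite | github.com/santiagobusta/photonboxes_qsd | .venv/lib/python3.9/site-packages/picos/expressions/exp_biaffine.py | _reindex_F
-- ===== SOURCE A (Python) =====
-- def _reindex_F(indices, source, destination):
--     """Convert indices between different tensor shapes in Fortran-order."""
--     new = []
--     offset = 0
--     factor = 1
--
--     for index, base in zip(indices, source):
--         offset += factor*index
--         factor *= base
--
--     for base in destination:
--         offset, remainder = divmod(offset, base)
--         new.append(remainder)
--
--     return tuple(new)
-- ===== SOURCE B (Python) =====
-- def _reindex_F(indices, source, destination):
--     """Convert indices between different tensor shapes in Fortran-order.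
--
--     Mixed-radix accumulation: the scalar flat offset is never formed.
--     A digit vector over the destination radices is maintained, and each
--     source term index*factor is added into it by schoolbook carry
--     propagation (digit-wise divmod), like long addition.
--     """
--     digits = [0] * len(destination)
--     factor = 1
--     for index, base in zip(indices, source):
--         carry = index * factor
--         for i, dbase in enumerate(destination):
--             carry, digits[i] = divmod(digits[i] + carry, dbase)
--         factor *= base
--     return tuple(digits)
-- ===== Notes on version B (the rewrite author's own statement) =====
-- stated objective: alternative
-- what changed: B never forms the scalar flat offset: it maintains a digit vector over the destination radices and adds each source term index*factor into it by schoolbook carry propagation (digit-wise divmod), instead of summing a single offset and then decoding it with a sequential divmod loop.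
import Mathlib
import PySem

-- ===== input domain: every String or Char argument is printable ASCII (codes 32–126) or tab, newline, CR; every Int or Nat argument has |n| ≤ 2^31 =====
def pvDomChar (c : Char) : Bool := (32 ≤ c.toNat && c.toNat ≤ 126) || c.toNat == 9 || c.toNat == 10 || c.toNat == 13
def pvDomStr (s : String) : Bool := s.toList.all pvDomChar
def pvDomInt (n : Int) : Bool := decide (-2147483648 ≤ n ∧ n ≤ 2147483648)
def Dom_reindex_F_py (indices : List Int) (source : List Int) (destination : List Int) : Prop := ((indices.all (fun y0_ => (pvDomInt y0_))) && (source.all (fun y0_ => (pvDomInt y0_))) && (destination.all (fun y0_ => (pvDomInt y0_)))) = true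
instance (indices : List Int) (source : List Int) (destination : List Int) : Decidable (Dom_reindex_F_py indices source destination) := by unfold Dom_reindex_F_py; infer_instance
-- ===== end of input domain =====

-- B never forms the scalar flat offset: it keeps a digit vector over the destination
-- radices and adds each source term into it by carry propagation (objective: alternative).

-- ===== PORT A =====
-- encode loop: state (offset, factor); decode loop: state (offset, new)
def reindex_F_py (indices : List Int) (source : List Int) (destination : List Int) : List Int :=
  let enc := (List.zip indices source).foldl
    (fun (s : Int × Int) ib => (s.1 + s.2 * ib.1, s.2 * ib.2)) (0, 1)
  let dec := destination.foldl
    (fun (s : Int × List Int) base =>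
      (PySem.Int.floordiv s.1 base, s.2 ++ [PySem.Int.mod s.1 base])) (enc.1, [])
  dec.2

-- ===== PORT B =====
-- Source B's inner loop: add `carry` into the digit vector, one divmod per destination base
def pvCarryAdd : Int → List Int → List Int → List Int
  | _, [], _ => []
  | _, ds, [] => ds
  | c, d :: ds, b :: bs =>
      PySem.Int.mod (d + c) b :: pvCarryAdd (PySem.Int.floordiv (d + c) b) ds bs

def reindex_F_py_alt (indices : List Int) (source : List Int) (destination : List Int) : List Int :=
  ((List.zip indices source).foldl
    (fun (s : List Int × Int) ib =>
      (pvCarryAdd (ib.1 * s.2) s.1 destination, s.2 * ib.2))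
    (List.replicate destination.length 0, 1)).1

-- ===== PRECONDITION & SPEC =====
-- Pre_ excludes exactly the inputs where A raises: a zero base in destination is a
-- ZeroDivisionError in A's divmod.
def Pre_reindex_F_py (_indices : List Int) (_source : List Int) (destination : List Int) : Prop :=
  ∀ b ∈ destination, b ≠ 0
instance (indices : List Int) (source : List Int) (destination : List Int) : Decidable (Pre_reindex_F_py indices source destination) := by unfold Pre_reindex_F_py; infer_instance

def pvWitness_reindex_F_py : List Int × List Int × List Int := ([1, 2], [3, 4], [2, -3, 2])

def Spec_reindex_F_py (indices : List Int) (source : List Int) (destination : List Int) (out : List Int) : Prop := out = reindex_F_py_alt indices source destination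
instance (indices : List Int) (source : List Int) (destination : List Int) (out : List Int) : Decidable (Spec_reindex_F_py indices source destination out) := by unfold Spec_reindex_F_py; infer_instance

-- ===== CLAIM =====
def Claim_equal_reindex_F_py : Prop := ∀ (indices : List Int) (source : List Int) (destination : List Int), Dom_reindex_F_py indices source destination → Pre_reindex_F_py indices source destination → Spec_reindex_F_py indices source destination (reindex_F_py indices source destination)

-- ===== LEMMAS AND PROOFS =====

-- the mixed-radix digit string of an integer over a list of bases
def pvDigits : Int → List Int → List Int
  | _, [] => []
  | o, b :: bs => PySem.Int.mod o b :: pvDigits (PySem.Int.floordiv o b) bs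

theorem pvFdivShift (s v b : Int) (hb : b ≠ 0) :
    PySem.Int.floordiv (s + v) b
      = PySem.Int.floordiv s b + PySem.Int.floordiv (PySem.Int.mod s b + v) b := by
  have hs := PySem.Int.floordiv_mul_add_mod s b
  have : s + v = (PySem.Int.mod s b + v) + b * PySem.Int.floordiv s b := by linarith
  rw [this]
  show Int.fdiv _ _ = _
  rw [Int.add_mul_fdiv_left _ _ hb]
  exact add_comm _ _

theorem pvFmodShift (s v b : Int) (hb : b ≠ 0) :
    PySem.Int.mod (s + v) b = PySem.Int.mod (PySem.Int.mod s b + v) b := by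
  have h1 := PySem.Int.floordiv_mul_add_mod (s + v) b
  have h2 := PySem.Int.floordiv_mul_add_mod (PySem.Int.mod s b + v) b
  have h3 := pvFdivShift s v b hb
  have hs := PySem.Int.floordiv_mul_add_mod s b
  linear_combination h1 - h2 - hs - b * h3

-- carry-adding v into the digits of s yields the digits of s + v
theorem pvCarryDigits (dest : List Int) (hnz : ∀ b ∈ dest, b ≠ 0) :
    ∀ s v : Int, pvCarryAdd v (pvDigits s dest) dest = pvDigits (s + v) dest := by
  induction dest with
  | nil => intro s v; rfl
  | cons b bs ih =>
    intro s v
    have hb : b ≠ 0 := hnz b (List.mem_cons_self ..)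
    have hbs : ∀ x ∈ bs, x ≠ 0 := fun x hx => hnz x (List.mem_cons_of_mem _ hx)
    simp only [pvDigits, pvCarryAdd]
    congr 1
    · exact (pvFmodShift s v b hb).symm
    · rw [ih hbs]
      congr 1
      rw [pvFdivShift s v b hb]

-- the zero digit vector
theorem pvDigitsZero (dest : List Int) : pvDigits 0 dest = List.replicate dest.length 0 := by
  induction dest with
  | nil => rfl
  | cons b bs ih =>
    simp only [pvDigits, List.length_cons, List.replicate_succ]
    show Int.fmod 0 b :: pvDigits (Int.fdiv 0 b) bs = 0 :: List.replicate bs.length 0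
    rw [Int.zero_fmod, Int.zero_fdiv, ih]

-- A's decode loop produces the digit string of the offset
theorem pvDecA (dest : List Int) : ∀ (o : Int) (acc : List Int),
    (dest.foldl (fun (s : Int × List Int) base =>
        (PySem.Int.floordiv s.1 base, s.2 ++ [PySem.Int.mod s.1 base])) (o, acc)).2
      = acc ++ pvDigits o dest := by
  induction dest with
  | nil => intro o acc; simp [pvDigits]
  | cons b bs ih =>
    intro o acc
    rw [List.foldl_cons]
    rw [ih]
    simp [pvDigits]

-- main invariant: B's fold state carries the digits of A's fold offset, with equal factors
theorem pvMain (dest : List Int) (hnz : ∀ b ∈ dest, b ≠ 0) (zs : List (Int × Int)) :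
    ∀ (t f : Int),
      (zs.foldl (fun (s : List Int × Int) ib =>
          (pvCarryAdd (ib.1 * s.2) s.1 dest, s.2 * ib.2)) (pvDigits t dest, f)).1
        = pvDigits ((zs.foldl (fun (s : Int × Int) ib =>
            (s.1 + s.2 * ib.1, s.2 * ib.2)) (t, f)).1) dest := by
  induction zs with
  | nil => intro t f; rfl
  | cons ib zs ih =>
    intro t f
    simp only [List.foldl_cons]
    have h : pvCarryAdd (ib.1 * f) (pvDigits t dest) dest = pvDigits (t + f * ib.1) dest := by
      rw [pvCarryDigits dest hnz t (ib.1 * f)]; ring_nf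
    rw [h, ih]

-- ===== VERDICT =====
theorem reindex_F_py_spec : Claim_equal_reindex_F_py := by
  intro indices source destination _ hpre
  unfold Spec_reindex_F_py reindex_F_py reindex_F_py_alt
  simp only
  rw [pvDecA, ← pvDigitsZero, pvMain destination hpre]
  simp
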